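-- pv_equiv track=rewrite | github.com/aleesma2811/HeuristicSearchStrategies | buscaCaminosSolver.py | pathToString
-- ===== SOURCE A (Python) =====
-- locations = {
--     'A': (0, 0), 'B': (0, 1), 'C': (0, 2), 'D': (0, 3), 'E': (0, 4),
--     'F': (1, 0), 'G': (1, 1), 'H': (1, 2), 'I': (1, 3), 'J': (1, 4),
--     'K': (2, 0), 'L': (2, 1), 'M': (2, 2), 'N': (2, 3), 'Ñ': (2, 4),
--     'O': (3, 0), 'P': (3, 1), 'Q': (3, 2), 'R': (3, 3), 'S': (3, 4),
--     'T': (4, 0), 'U': (4, 1), 'V': (4, 2), 'W': (4, 3), 'X': (4, 4)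
-- }
--
-- def pathToString(path):
--     pathString = ""
--     for node in path:
--         for key, value in locations.items():
--             if value == node:
--                 pathString += key + " -> "
--                 break
--     return pathString
-- ===== SOURCE B (Python) =====
-- LETTERS = "ABCDEFGHIJKLMN\u00d1OPQRSTUVWX"
--
-- def pathToString(path):
--     # The grid is exactly 5x5 row-major, so the letter for (r, c) is LETTERS[5*r + c].
--     return "".join(LETTERS[5 * r + c] + " -> "
--                    for (r, c) in path
--                    if 0 <= r < 5 and 0 <= c < 5)
-- ===== Notes on version B (the rewrite author's own statement) =====
-- stated objective: simpler
-- what changed: Replaces A's inner linear scan over the 25-entry dict with a closed-form arithmetic lookup (the grid is 5x5 row-major, so the letter for (r,c) is LETTERS[5*r+c] under a bounds guard) inside a single join of a comprehension.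
import Mathlib
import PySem

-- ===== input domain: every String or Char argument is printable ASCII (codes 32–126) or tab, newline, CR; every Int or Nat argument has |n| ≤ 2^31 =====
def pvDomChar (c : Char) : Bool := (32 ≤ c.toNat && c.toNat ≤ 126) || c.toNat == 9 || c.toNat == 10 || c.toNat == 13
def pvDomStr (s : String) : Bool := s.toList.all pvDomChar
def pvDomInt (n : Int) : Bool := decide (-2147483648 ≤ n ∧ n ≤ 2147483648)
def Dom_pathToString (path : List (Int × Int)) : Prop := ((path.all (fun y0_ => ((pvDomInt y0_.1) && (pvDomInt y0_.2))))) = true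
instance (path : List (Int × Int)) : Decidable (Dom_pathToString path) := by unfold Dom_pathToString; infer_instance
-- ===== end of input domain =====

-- B replaces A's inner linear scan over the 25-entry dict by a closed-form arithmetic
-- lookup in a 5x5 row-major letter table (objective: simpler).

-- ===== PORT A =====
-- the module-level `locations` dict, in insertion order
def locationsA : List (String × (Int × Int)) :=
  [("A",(0,0)),("B",(0,1)),("C",(0,2)),("D",(0,3)),("E",(0,4)),
   ("F",(1,0)),("G",(1,1)),("H",(1,2)),("I",(1,3)),("J",(1,4)),
   ("K",(2,0)),("L",(2,1)),("M",(2,2)),("N",(2,3)),("Ñ",(2,4)),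
   ("O",(3,0)),("P",(3,1)),("Q",(3,2)),("R",(3,3)),("S",(3,4)),
   ("T",(4,0)),("U",(4,1)),("V",(4,2)),("W",(4,3)),("X",(4,4))]

-- inner `for key, value in locations.items(): if value == node: …; break`
def scanA : List (String × (Int × Int)) → (Int × Int) → String
  | [], _ => ""
  | (k, v) :: rest, node => if v == node then k ++ " -> " else scanA rest node

def pathToString (path : List (Int × Int)) : String :=
  path.foldl (fun pathString node => pathString ++ scanA locationsA node) ""

-- ===== PORT B =====
def lettersB : List String :=
  ["A","B","C","D","E","F","G","H","I","J","K","L","M","N","Ñ",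
   "O","P","Q","R","S","T","U","V","W","X"]

-- one element of Source B's comprehension; the index 5*r+c is in range whenever the guard holds
def stepB (p : Int × Int) : Option String :=
  if 0 ≤ p.1 ∧ p.1 < 5 ∧ 0 ≤ p.2 ∧ p.2 < 5 then
    some (((PySem.List.pyGet? lettersB (5 * p.1 + p.2)).getD "") ++ " -> ")
  else none

def pathToString_alt (path : List (Int × Int)) : String :=
  String.join (path.filterMap stepB)

-- ===== PRECONDITION & SPEC =====
def Spec_pathToString (path : List (Int × Int)) (out : String) : Prop := out = pathToString_alt path
instance (path : List (Int × Int)) (out : String) : Decidable (Spec_pathToString path out) := by unfold Spec_pathToString; infer_instance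

-- ===== CLAIM (what is proved, stated in full; the proofs are below) =====
def Claim_equal_pathToString : Prop := ∀ (path : List (Int × Int)), Dom_pathToString path → Spec_pathToString path (pathToString path)

-- ===== LEMMAS AND PROOFS =====

-- pulling the initial accumulator out of a string foldl
theorem foldl_append_shift (l : List String) (s : String) :
    l.foldl (fun r x => r ++ x) s = s ++ l.foldl (fun r x => r ++ x) "" := by
  induction l generalizing s with
  | nil => simp
  | cons a t ih =>
    simp only [List.foldl_cons]
    rw [ih (s ++ a), ih ("" ++ a)]
    simp [String.append_assoc]

-- an unmatched node leaves A's scan empty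
theorem scan_empty (L : List (String × (Int × Int))) (node : Int × Int)
    (h : ∀ kv ∈ L, kv.2 ≠ node) : scanA L node = "" := by
  induction L with
  | nil => rfl
  | cons kv rest ih =>
    obtain ⟨k, v⟩ := kv
    have hv : v ≠ node := h (k, v) (List.mem_cons_self)
    simp only [scanA, beq_iff_eq, hv, if_false]
    exact ih fun p hp => h p (List.mem_cons_of_mem _ hp)

-- all coordinates in the table lie in the 5x5 grid
theorem loc_bounds : ∀ kv ∈ locationsA,
    0 ≤ kv.2.1 ∧ kv.2.1 < 5 ∧ 0 ≤ kv.2.2 ∧ kv.2.2 < 5 := by decide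

-- per-node agreement: A's scan equals B's step (contributing "" where B filters out)
theorem scan_eq_step (r c : Int) :
    scanA locationsA (r, c) = ((stepB (r, c)).getD "") := by
  by_cases h : 0 ≤ r ∧ r < 5 ∧ 0 ≤ c ∧ c < 5
  · obtain ⟨h1, h2, h3, h4⟩ := h
    interval_cases r <;> interval_cases c <;> decide
  · simp only [stepB, h, if_false, Option.getD_none]
    refine scan_empty _ _ fun kv hm heq => ?_
    have hb := loc_bounds kv hm
    rw [heq] at hb
    simp only at hb
    omega

theorem foldl_eq_join (path : List (Int × Int)) (acc : String) :
    path.foldl (fun pathString node => pathString ++ scanA locationsA node) acc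
      = acc ++ String.join (path.filterMap stepB) := by
  induction path generalizing acc with
  | nil => simp [String.join]
  | cons n t ih =>
    obtain ⟨r, c⟩ := n
    simp only [List.foldl_cons, List.filterMap_cons, ih, scan_eq_step]
    cases hs : stepB (r, c) with
    | none => simp
    | some s =>
      simp only [String.join, List.foldl_cons, Option.getD_some, String.empty_append]
      rw [foldl_append_shift]
      simp only [String.append_assoc]
      exact congrArg (acc ++ ·) (foldl_append_shift _ s).symm

-- ===== VERDICT (by name: the statement is the Claim_ definition above) =====
theorem pathToString_spec : Claim_equal_pathToString := by
  intro path _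
  unfold Spec_pathToString pathToString pathToString_alt
  simpa using foldl_eq_join path ""
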